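-- pv_equiv track=rewrite | github.com/CupCupRay/Bin2Summary | src/deepbindiff_emb/binary_analysis.py | OutputCount
-- ===== SOURCE A (Python) =====
-- def OutputCount(input_opcodes_list):
--     statics = {}
--     for opcode in input_opcodes_list:
--         if opcode not in statics:
--             statics.update({opcode: 1})
--         else:
--             count = statics[opcode] + 1
--             statics.update({opcode: count})
--     return str(statics)
-- ===== SOURCE B (Python) =====
-- def OutputCount(input_opcodes_list):
--     items = ["%r: %d" % (op, input_opcodes_list.count(op))
--              for op in dict.fromkeys(input_opcodes_list)]
--     return "{" + ", ".join(items) + "}"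
-- ===== Notes on version B (the rewrite author's own statement) =====
-- stated objective: alternative
-- what changed: Builds no dict at all: takes the distinct opcodes in first-appearance order via dict.fromkeys, counts each with list.count, and assembles the output string directly with join instead of str(dict) of an accumulating single pass.
import Mathlib
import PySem

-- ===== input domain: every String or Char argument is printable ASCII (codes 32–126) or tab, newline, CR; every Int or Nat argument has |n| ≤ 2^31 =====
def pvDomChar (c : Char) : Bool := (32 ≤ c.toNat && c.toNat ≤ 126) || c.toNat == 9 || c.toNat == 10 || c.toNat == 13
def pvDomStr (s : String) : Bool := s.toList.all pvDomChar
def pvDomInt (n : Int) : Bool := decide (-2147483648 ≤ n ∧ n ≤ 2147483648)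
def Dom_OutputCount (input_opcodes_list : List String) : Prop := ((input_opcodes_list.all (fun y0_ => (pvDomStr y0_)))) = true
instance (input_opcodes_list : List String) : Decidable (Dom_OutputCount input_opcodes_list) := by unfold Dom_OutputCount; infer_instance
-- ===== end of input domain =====

-- B builds no dict: it joins "repr(op): count(op)" pieces over the distinct opcodes, instead of A's str() of a single accumulating dict pass.

-- ===== PORT A =====
-- str-repr of one character inside a str repr with quote q (exact for printable ASCII plus tab/newline/CR)
def pyEscChar (q c : Char) : List Char :=
  if c = '\\' then ['\\', '\\']
  else if c = q then ['\\', q]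
  else if c = '\t' then ['\\', 't']
  else if c = '\n' then ['\\', 'n']
  else if c = '\r' then ['\\', 'r']
  else [c]

-- repr's quote choice
def pyQuote (cs : List Char) : Char :=
  if cs.contains '\'' && !(cs.contains '"') then '"' else '\''

-- Python repr of a str key (exact on the ASCII domain above)
def pyReprStr (s : String) : List Char :=
  pyQuote s.toList :: s.toList.flatMap (pyEscChar (pyQuote s.toList)) ++ [pyQuote s.toList]

-- one "key: value" item of str(dict)
def pyItemChars (p : String × Int) : List Char :=
  pyReprStr p.1 ++ ':' :: ' ' :: PySem.Int.toChars p.2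

-- str(dict) for a dict with str keys and int values, given its items in order
def pyDictStr (items : List (String × Int)) : String :=
  match items with
  | [] => "{}"
  | p :: rest =>
      String.mk ('{' :: (pyItemChars p ++ rest.flatMap (fun q => ',' :: ' ' :: pyItemChars q) ++ ['}']))

def OutputCount (input_opcodes_list : List String) : String :=
  let statics := input_opcodes_list.foldl
    (fun d opcode =>
      if d.contains opcode = false then d.insert opcode 1
      else d.insert opcode (d.getD opcode 0 + 1))
    (PySem.Dict.empty : PySem.Dict String Int)
  pyDictStr statics.items

-- ===== PORT B =====
-- B-side repr: same escapes written as a branch chain in a different order (the cases are disjoint)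
def escB (q c : Char) : List Char :=
  if c = '\t' then ['\\', 't']
  else if c = '\n' then ['\\', 'n']
  else if c = '\r' then ['\\', 'r']
  else if c = '\\' then ['\\', '\\']
  else if c = q then ['\\', q]
  else [c]

def quoteB (s : String) : Char :=
  if '\'' ∈ s.toList ∧ ¬ ('"' ∈ s.toList) then '"' else '\''

def reprB (s : String) : List Char :=
  quoteB s :: (s.toList.flatMap (escB (quoteB s)) ++ [quoteB s])

-- "%r: %d" % (op, count)
def itemB (l : List String) (op : String) : List Char :=
  reprB op ++ (": ").toList ++ PySem.Int.toChars (l.count op : Int)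

def OutputCount_alt (input_opcodes_list : List String) : String :=
  let items := (PySem.List.dedup input_opcodes_list).map (itemB input_opcodes_list)
  String.mk (("{").toList ++ List.intercalate (", ").toList items ++ ("}").toList)

-- ===== PRECONDITION & SPEC =====
def Spec_OutputCount (input_opcodes_list : List String) (out : String) : Prop := out = OutputCount_alt input_opcodes_list
instance (input_opcodes_list : List String) (out : String) : Decidable (Spec_OutputCount input_opcodes_list out) := by unfold Spec_OutputCount; infer_instance

-- ===== CLAIM =====
def Claim_equal_OutputCount : Prop := ∀ (input_opcodes_list : List String), Dom_OutputCount input_opcodes_list → Spec_OutputCount input_opcodes_list (OutputCount input_opcodes_list)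

-- ===== LEMMAS AND PROOFS =====

-- A's branching update is, pointwise, the unconditional counting insert
lemma stepA_eq (d : PySem.Dict String Int) (x : String) :
    (if d.contains x = false then d.insert x 1
     else d.insert x (d.getD x 0 + 1)) = d.insert x (d.getD x 0 + 1) := by
  by_cases h : d.contains x = false
  · simp [h, PySem.Dict.getD_of_not_contains (h := h)]
  · simp [h]

lemma escB_eq (q c : Char) (h1 : q ≠ '\t') (h2 : q ≠ '\n') (h3 : q ≠ '\r') :
    escB q c = pyEscChar q c := by
  unfold escB pyEscChar
  split_ifs <;> simp_all

lemma quoteB_eq (s : String) : quoteB s = pyQuote s.toList := by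
  unfold quoteB pyQuote
  simp

lemma pyQuote_notesc (cs : List Char) :
    pyQuote cs ≠ '\t' ∧ pyQuote cs ≠ '\n' ∧ pyQuote cs ≠ '\r' := by
  unfold pyQuote
  split_ifs <;> simp

lemma reprB_eq (s : String) : reprB s = pyReprStr s := by
  unfold reprB pyReprStr
  rw [quoteB_eq]
  obtain ⟨h1, h2, h3⟩ := pyQuote_notesc s.toList
  simp [funext fun c => escB_eq _ c h1 h2 h3]

lemma itemB_eq (l : List String) (op : String) :
    itemB l op = pyItemChars (op, (l.count op : Int)) := by
  unfold itemB pyItemChars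
  rw [reprB_eq]
  simp

lemma intercalate_comma (xs : List (List Char)) (a : List Char) :
    List.intercalate (", ").toList (a :: xs)
      = a ++ xs.flatMap (fun x => ',' :: ' ' :: x) := by
  induction xs generalizing a with
  | nil => simp [List.intercalate]
  | cons b rest ih =>
      have : List.intercalate (", ").toList (a :: b :: rest)
          = a ++ (", ").toList ++ List.intercalate (", ").toList (b :: rest) := by
        simp [List.intercalate, List.intersperse]
      rw [this, ih]
      simp

lemma pyDictStr_eq (ps : List (String × Int)) :
    pyDictStr ps
      = String.mk (("{").toList ++ List.intercalate (", ").toList (ps.map pyItemChars) ++ ("}").toList) := by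
  cases ps with
  | nil => simp [pyDictStr, List.intercalate]; rfl
  | cons p rest =>
      simp only [pyDictStr, List.map_cons]
      rw [intercalate_comma]
      simp [List.flatMap_map]

theorem OutputCount_spec : Claim_equal_OutputCount := by
  intro l _
  show OutputCount l = OutputCount_alt l
  unfold OutputCount OutputCount_alt
  simp only [funext fun d => funext fun x => stepA_eq d x,
    PySem.Dict.foldl_insert_getD_add_one_eq_counter, PySem.Dict.items_counter,
    PySem.List.dedup_eq_ofList]
  rw [pyDictStr_eq, List.map_map]
  have : (PySem.Set.ofList l).map (pyItemChars ∘ fun k => (k, (l.count k : Int)))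
      = (PySem.Set.ofList l).map (itemB l) :=
    List.map_congr_left fun x _ => (itemB_eq l x).symm
  rw [this]
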